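-- pv_equiv track=rewrite | github.com/dougdotcon/TamesisTheoryCompleteResearchArchive | 28_Graph_Zeta_Primes/graph_zeta.py | _remove_rotations
-- ===== SOURCE A (Python) =====
-- from typing import Dict, List, Tuple, Set
--
-- def _remove_rotations(cycles: List[Tuple]) -> List[Tuple]:
--     """Remove ciclos que sao rotacoes um do outro"""
--     seen = set()
--     unique = []
--
--     for cycle, length, weight in cycles:
--         # Normaliza: menor rotacao lexicografica
--         min_rotation = min(cycle[i:] + cycle[:i] for i in range(len(cycle)))
--
--         if min_rotation not in seen:
--             seen.add(min_rotation)
--             unique.append((cycle, length, weight))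
--
--     return unique
-- ===== SOURCE B (Python) =====
-- from typing import Dict, List, Tuple, Set
--
-- def _remove_rotations(cycles: List[Tuple]) -> List[Tuple]:
--     """Sieve: repeatedly keep the first pending cycle and delete every later
--     pending cycle that is literally one of its rotations (no canonical-form
--     computation, no seen-set of keys)."""
--     unique = []
--     pending = list(cycles)
--     while pending:
--         head = pending[0]
--         cycle = head[0]
--         rots = {cycle[i:] + cycle[:i] for i in range(len(cycle))}
--         unique.append(head)
--         pending = [t for t in pending[1:] if t[0] not in rots]
--     return unique
-- ===== Notes on version B (the rewrite author's own statement) =====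
-- stated objective: alternative
-- what changed: A canonicalises every cycle to its lexicographically minimal rotation and keeps a seen-set of canonical keys; B is a sieve with no canonical form and no key set: it repeatedly keeps the first pending cycle and filters all of its rotations out of the remaining worklist.
import Mathlib
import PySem

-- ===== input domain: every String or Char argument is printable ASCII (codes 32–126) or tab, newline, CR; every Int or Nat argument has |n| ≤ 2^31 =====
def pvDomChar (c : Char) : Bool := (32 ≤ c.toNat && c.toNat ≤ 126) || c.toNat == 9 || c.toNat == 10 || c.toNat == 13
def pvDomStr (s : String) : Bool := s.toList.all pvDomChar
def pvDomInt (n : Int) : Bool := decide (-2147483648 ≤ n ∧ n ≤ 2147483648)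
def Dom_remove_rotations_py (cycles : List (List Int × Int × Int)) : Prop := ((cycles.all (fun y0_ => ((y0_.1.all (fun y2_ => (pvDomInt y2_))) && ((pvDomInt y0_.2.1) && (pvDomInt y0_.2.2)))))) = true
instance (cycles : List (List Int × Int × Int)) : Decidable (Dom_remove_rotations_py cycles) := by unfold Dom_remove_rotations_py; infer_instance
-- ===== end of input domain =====

-- B replaces A's seen-set of minimal-rotation canonical keys by a sieve: keep the first
-- pending cycle, filter all of its rotations out of the worklist, repeat; same return value.

-- ===== PORT A =====
-- cycle[i:] + cycle[:i]
def pvRot (c : List Int) (i : Int) : List Int :=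
  PySem.List.slice c (some i) none ++ PySem.List.slice c none (some i)

-- the rotations A's generator '(cycle[i:] + cycle[:i] for i in range(len(cycle)))' produces
def pvRotsList (c : List Int) : List (List Int) :=
  (PySem.List.pyRange 0 (c.length : Int) 1).map (fun i => pvRot c i)

-- min(...); the .getD [] stands for the ValueError on an empty cycle, excluded by Pre_
def pvMinRot (c : List Int) : List Int :=
  (PySem.List.min? (pvRotsList c) (fun x => x)).getD []

def remove_rotations_py (cycles : List (List Int × Int × Int)) : List (List Int × Int × Int) :=
  (cycles.foldl
    (fun (st : PySem.Set (List Int) × List (List Int × Int × Int)) t =>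
      let min_rotation := pvMinRot t.1
      if PySem.Set.contains st.1 min_rotation then st
      else (PySem.Set.add st.1 min_rotation, st.2 ++ [t]))
    (([] : PySem.Set (List Int)), ([] : List (List Int × Int × Int)))).2

-- ===== PORT B =====
-- rots = {cycle[i:] + cycle[:i] for i in range(len(cycle))}
def pvRotsSetB (c : List Int) : PySem.Set (List Int) :=
  PySem.Set.ofList ((PySem.List.pyRange 0 (c.length : Int) 1).map
    (fun i => PySem.List.slice c (some i) none ++ PySem.List.slice c none (some i)))

-- the while loop: take the head, append it to unique, filter its rotations out of the rest
def pvLoopB (pending unique : List (List Int × Int × Int)) : List (List Int × Int × Int) :=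
  match pending with
  | [] => unique
  | head :: rest =>
      pvLoopB (rest.filter (fun t => !(PySem.Set.contains (pvRotsSetB head.1) t.1)))
        (unique ++ [head])
termination_by pending.length
decreasing_by
  simp only [List.length_unattach]
  exact Nat.lt_succ_of_le (le_trans (List.length_filter_le _ _) (by simp))

def remove_rotations_py_alt (cycles : List (List Int × Int × Int)) : List (List Int × Int × Int) :=
  pvLoopB cycles []

-- ===== PRECONDITION & SPEC =====
-- Pre_ excludes inputs containing an empty cycle tuple: there A's min() over zero
-- rotations raises ValueError, so A returns on exactly the inputs admitted here.
def Pre_remove_rotations_py (cycles : List (List Int × Int × Int)) : Prop :=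
  ∀ t ∈ cycles, t.1 ≠ []
instance (cycles : List (List Int × Int × Int)) : Decidable (Pre_remove_rotations_py cycles) := by unfold Pre_remove_rotations_py; infer_instance

def pvWitness_remove_rotations_py : (List (List Int × Int × Int)) :=
  [([1, 2], 2, 1), ([2, 1], 2, 3), ([1], 1, 1)]

def Spec_remove_rotations_py (cycles : List (List Int × Int × Int)) (out : List (List Int × Int × Int)) : Prop := out = remove_rotations_py_alt cycles
instance (cycles : List (List Int × Int × Int)) (out : List (List Int × Int × Int)) : Decidable (Spec_remove_rotations_py cycles out) := by unfold Spec_remove_rotations_py; infer_instance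

-- ===== CLAIM (what is proved, stated in full; the proofs are below) =====
def Claim_equal_remove_rotations_py : Prop := ∀ (cycles : List (List Int × Int × Int)), Dom_remove_rotations_py cycles → Pre_remove_rotations_py cycles → Spec_remove_rotations_py cycles (remove_rotations_py cycles)

-- ===== LEMMAS AND PROOFS =====

theorem pvRot_natCast (c : List Int) (j : Nat) (hj : j ≤ c.length) :
    pvRot c (j : Int) = c.rotate j := by
  simp [pvRot, PySem.List.slice_from_natCast, PySem.List.slice_to_natCast,
    List.rotate_eq_drop_append_take hj]

theorem mem_pvRotsList {c x : List Int} (hc : c ≠ []) :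
    x ∈ pvRotsList c ↔ c ~r x := by
  unfold pvRotsList
  rw [PySem.List.pyRange_one]
  simp only [List.mem_map, List.mem_range]
  constructor
  · rintro ⟨i, ⟨j, hj, rfl⟩, rfl⟩
    simp only [sub_zero, Int.toNat_natCast] at hj
    rw [zero_add, pvRot_natCast c j (le_of_lt hj)]
    exact ⟨j, rfl⟩
  · rintro hrot
    obtain ⟨n, hn, rfl⟩ := List.isRotated_iff_mod.mp hrot
    have hlen : 0 < c.length := List.length_pos_iff.mpr hc
    refine ⟨(n % c.length : Nat), ⟨n % c.length, ?_, by push_cast; ring⟩, ?_⟩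
    · simpa using Nat.mod_lt _ hlen
    · rw [pvRot_natCast c (n % c.length) (le_of_lt (Nat.mod_lt _ hlen))]
      rw [List.rotate_mod]

theorem pvRotsList_ne_nil {c : List Int} (hc : c ≠ []) : pvRotsList c ≠ [] := by
  have : c ∈ pvRotsList c := (mem_pvRotsList hc).mpr (List.IsRotated.refl c)
  intro h; rw [h] at this; exact (List.not_mem_nil this)

-- the running-minimum loop inside Python's min(), abstracted over its step function
theorem pvMinAux (f : Option (List Int) → List Int → Option (List Int))
    (hf0 : ∀ x, f none x = some x)
    (hf1 : ∀ mm x, f (some mm) x = if x < mm then some x else some mm) :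
    ∀ (t : List (List Int)) (acc : Option (List Int)) (m : List Int),
    t.foldl f acc = some m →
    ((acc = none → m ∈ t) ∧ (∀ a, acc = some a → (m = a ∨ m ∈ t) ∧ ¬ a < m) ∧
      ∀ y ∈ t, ¬ y < m) := by
  intro t
  induction t with
  | nil =>
      intro acc m h
      simp only [List.foldl_nil] at h
      subst h
      refine ⟨fun hn => (by cases hn), fun a ha => ?_, by simp⟩
      injection ha with e
      subst e
      exact ⟨Or.inl rfl, lt_irrefl _⟩
  | cons x t ih =>
      intro acc m h
      simp only [List.foldl_cons] at h
      cases acc with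
      | none =>
          rw [hf0] at h
          obtain ⟨-, hsome, htail⟩ := ih (some x) m h
          obtain ⟨hmem, hxm⟩ := hsome x rfl
          refine ⟨fun _ => hmem.elim (fun e => e ▸ List.mem_cons_self) (List.mem_cons_of_mem _),
            fun a ha => (by cases ha), ?_⟩
          intro y hy
          rcases List.mem_cons.mp hy with rfl | hy'
          · exact hxm
          · exact htail y hy'
      | some a =>
          rw [hf1] at h
          by_cases hxa : x < a
          · rw [if_pos hxa] at h
            obtain ⟨-, hsome, htail⟩ := ih (some x) m h
            obtain ⟨hmem, hxm⟩ := hsome x rfl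
            refine ⟨fun hn => (by cases hn), fun a' ha' => ?_, ?_⟩
            · injection ha' with e; subst e
              refine ⟨Or.inr (hmem.elim (fun e => e ▸ List.mem_cons_self) (List.mem_cons_of_mem _)), ?_⟩
              intro ham; exact hxm (lt_trans hxa ham)
            · intro y hy
              rcases List.mem_cons.mp hy with rfl | hy'
              · exact hxm
              · exact htail y hy'
          · rw [if_neg hxa] at h
            obtain ⟨-, hsome, htail⟩ := ih (some a) m h
            obtain ⟨hmem, ham⟩ := hsome a rfl
            refine ⟨fun hn => (by cases hn), fun a' ha' => ?_, ?_⟩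
            · injection ha' with e; subst e
              exact ⟨hmem.imp id (List.mem_cons_of_mem _), ham⟩
            · intro y hy
              rcases List.mem_cons.mp hy with rfl | hy'
              · intro hym
                rcases lt_trichotomy y a with h1 | h1 | h1
                · exact hxa h1
                · subst h1; exact ham hym
                · exact ham (lt_trans h1 hym)
              · exact htail y hy'

theorem pvMin?_isMin {xs : List (List Int)} {m : List Int}
    (h : PySem.List.min? xs (fun x => x) = some m) : ∀ y ∈ xs, ¬ y < m := by
  unfold PySem.List.min? at h
  exact (pvMinAux _ (fun _ => rfl) (fun _ _ => rfl) xs none m h).2.2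

theorem pvMinRot_isRotated {c : List Int} (hc : c ≠ []) : c ~r pvMinRot c := by
  unfold pvMinRot
  rcases h : PySem.List.min? (pvRotsList c) (fun x => x) with _ | m
  · exact absurd ((PySem.List.min?_eq_none_iff _ _).mp h) (pvRotsList_ne_nil hc)
  · exact (mem_pvRotsList hc).mp (PySem.List.min?_mem h)

theorem pvMinRot_notLt {c y : List Int} (hc : c ≠ []) (hy : c ~r y) :
    ¬ y < pvMinRot c := by
  unfold pvMinRot
  rcases h : PySem.List.min? (pvRotsList c) (fun x => x) with _ | m
  · exact absurd ((PySem.List.min?_eq_none_iff _ _).mp h) (pvRotsList_ne_nil hc)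
  · exact pvMin?_isMin h y ((mem_pvRotsList hc).mpr hy)

theorem pvMinRot_congr {c d : List Int} (hc : c ≠ []) (hcd : c ~r d) :
    pvMinRot c = pvMinRot d := by
  have hd : d ≠ [] := fun h => hc (List.isRotated_nil_iff.mp (h ▸ hcd))
  have h1 : ¬ pvMinRot d < pvMinRot c :=
    pvMinRot_notLt hc (hcd.trans (pvMinRot_isRotated hd))
  have h2 : ¬ pvMinRot c < pvMinRot d :=
    pvMinRot_notLt hd (hcd.symm.trans (pvMinRot_isRotated hc))
  rcases lt_trichotomy (pvMinRot c) (pvMinRot d) with h | h | h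
  · exact absurd h h2
  · exact h
  · exact absurd h h1

theorem pvMinRot_eq_iff {c x : List Int} (hc : c ≠ []) (hx : x ≠ []) :
    pvMinRot x = pvMinRot c ↔ c ~r x := by
  constructor
  · intro h
    have h1 : x ~r pvMinRot x := pvMinRot_isRotated hx
    have h2 : c ~r pvMinRot c := pvMinRot_isRotated hc
    rw [h] at h1
    exact h2.trans h1.symm
  · intro h; exact (pvMinRot_congr hc h).symm

-- proof-side intermediate: the seen-set of ALL rotations of the kept cycles
def pvAddRots (s : PySem.Set (List Int)) (c : List Int) : PySem.Set (List Int) :=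
  (PySem.List.pyRange 0 (c.length : Int) 1).foldl (fun s i => PySem.Set.add s (pvRot c i)) s

theorem mem_foldl_add {l : List (List Int)} :
    ∀ (s : PySem.Set (List Int)) (y : List Int),
      y ∈ l.foldl PySem.Set.add s ↔ y ∈ s ∨ y ∈ l := by
  induction l with
  | nil => simp
  | cons a t ih =>
      intro s y
      simp only [List.foldl_cons, ih, PySem.Set.mem_add, List.mem_cons]
      tauto

theorem mem_pvAddRots {s : PySem.Set (List Int)} {c y : List Int} (hc : c ≠ []) :
    y ∈ pvAddRots s c ↔ y ∈ s ∨ c ~r y := by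
  unfold pvAddRots
  rw [← List.foldl_map (f := fun i => pvRot c i) (g := PySem.Set.add)]
  have hr : (PySem.List.pyRange 0 (c.length : Int) 1).map (fun i => pvRot c i) = pvRotsList c := rfl
  rw [hr, mem_foldl_add, mem_pvRotsList hc]

-- the invariant relating A's seen-set (minimal rotations) and the intermediate one (all rotations)
def pvInv (sa sb : PySem.Set (List Int)) : Prop :=
  ∀ x : List Int, x ≠ [] → (pvMinRot x ∈ sa ↔ x ∈ sb)

theorem pvContains_iff {s : PySem.Set (List Int)} {x : List Int} :
    PySem.Set.contains s x = true ↔ x ∈ s := by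
  simp [PySem.Set.contains]

theorem pvMain : ∀ (cs : List (List Int × Int × Int)) (sa sb : PySem.Set (List Int))
    (acc : List (List Int × Int × Int)),
    (∀ t ∈ cs, t.1 ≠ []) → pvInv sa sb →
    (cs.foldl
      (fun (st : PySem.Set (List Int) × List (List Int × Int × Int)) t =>
        let min_rotation := pvMinRot t.1
        if PySem.Set.contains st.1 min_rotation then st
        else (PySem.Set.add st.1 min_rotation, st.2 ++ [t])) (sa, acc)).2
    = (cs.foldl
      (fun (st : PySem.Set (List Int) × List (List Int × Int × Int)) t =>
        if PySem.Set.contains st.1 t.1 then st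
        else (pvAddRots st.1 t.1, st.2 ++ [t])) (sb, acc)).2 := by
  intro cs
  induction cs with
  | nil => intro sa sb acc _ _; rfl
  | cons t ct ih =>
      intro sa sb acc hpre hinv
      have hc : t.1 ≠ [] := hpre t List.mem_cons_self
      have hcond : PySem.Set.contains sa (pvMinRot t.1) = PySem.Set.contains sb t.1 := by
        by_cases h : t.1 ∈ sb
        · rw [pvContains_iff.mpr h, pvContains_iff.mpr ((hinv t.1 hc).mpr h)]
        · have ha : pvMinRot t.1 ∉ sa := fun hmem => h ((hinv t.1 hc).mp hmem)
          rw [Bool.eq_iff_iff, pvContains_iff, pvContains_iff]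
          exact iff_of_false ha h
      simp only [List.foldl_cons]
      by_cases h : PySem.Set.contains sb t.1 = true
      · rw [hcond, h]
        simp only [if_true]
        exact ih sa sb acc (fun u hu => hpre u (List.mem_cons_of_mem _ hu)) hinv
      · rw [hcond, eq_false_of_ne_true h]
        simp only [Bool.false_eq_true, if_false]
        apply ih _ _ _ (fun u hu => hpre u (List.mem_cons_of_mem _ hu))
        intro x hx
        rw [PySem.Set.mem_add, mem_pvAddRots hc, hinv x hx, pvMinRot_eq_iff hc hx]

theorem pvContainsRotsSetB {c y : List Int} (hc : c ≠ []) :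
    PySem.Set.contains (pvRotsSetB c) y = true ↔ c ~r y := by
  have : pvRotsSetB c = PySem.Set.ofList (pvRotsList c) := rfl
  rw [pvContains_iff, this, PySem.Set.mem_ofList, mem_pvRotsList hc]

-- the intermediate fold equals B's sieve loop applied to the not-yet-seen part of the worklist
theorem contains_pvAddRots {sb : PySem.Set (List Int)} {c y : List Int} (hc : c ≠ []) :
    PySem.Set.contains (pvAddRots sb c) y
      = (PySem.Set.contains sb y || PySem.Set.contains (pvRotsSetB c) y) := by
  rw [Bool.eq_iff_iff]
  simp only [Bool.or_eq_true, pvContains_iff, pvContainsRotsSetB hc]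
  exact mem_pvAddRots hc

-- the intermediate fold equals B's sieve loop applied to the not-yet-seen part of the worklist
theorem pvBridge : ∀ (cs : List (List Int × Int × Int)) (sb : PySem.Set (List Int))
    (acc : List (List Int × Int × Int)),
    (∀ t ∈ cs, t.1 ≠ []) →
    (cs.foldl
      (fun (st : PySem.Set (List Int) × List (List Int × Int × Int)) t =>
        if PySem.Set.contains st.1 t.1 then st
        else (pvAddRots st.1 t.1, st.2 ++ [t])) (sb, acc)).2
    = pvLoopB (cs.filter (fun t => !(PySem.Set.contains sb t.1))) acc := by
  intro cs
  induction cs with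
  | nil => intro sb acc _; simp [pvLoopB]
  | cons t ct ih =>
      intro sb acc hpre
      have hc : t.1 ≠ [] := hpre t List.mem_cons_self
      simp only [List.foldl_cons, List.filter_cons]
      by_cases h : PySem.Set.contains sb t.1 = true
      · rw [h]
        simp only [Bool.not_true, Bool.false_eq_true, if_false, if_true]
        exact ih sb acc (fun u hu => hpre u (List.mem_cons_of_mem _ hu))
      · rw [eq_false_of_ne_true h]
        simp only [Bool.not_false, Bool.false_eq_true, if_false, if_true]
        rw [ih (pvAddRots sb t.1) (acc ++ [t]) (fun u hu => hpre u (List.mem_cons_of_mem _ hu))]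
        rw [pvLoopB, List.filter_filter]
        congr 1
        apply List.filter_congr
        intro u _
        rw [contains_pvAddRots hc]
        cases hA : PySem.Set.contains sb u.1 <;>
          cases hB : PySem.Set.contains (pvRotsSetB t.1) u.1 <;> simp

-- ===== VERDICT (by name: the statement is the Claim_ definition above) =====
theorem remove_rotations_py_spec : Claim_equal_remove_rotations_py := by
  intro cycles _ hpre
  unfold Spec_remove_rotations_py remove_rotations_py remove_rotations_py_alt
  have hinv : pvInv [] [] := fun x _ => iff_of_false List.not_mem_nil List.not_mem_nil
  rw [pvMain cycles [] [] [] hpre hinv, pvBridge cycles [] [] hpre]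
  congr 1
  simp
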